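-- pv_equiv track=rewrite | github.com/ripley2006-ui/StrategoAI-Live-Mod-Generator | system/programs/Live_Mod/Global_Mission_Settings/config_gms/gms_actions.py | _update_gameplay_tag_list
-- ===== SOURCE A (Python) =====
-- def _find_section_exact(text: str, header: str) -> tuple[int, int]:
--     """Return (start,end) byte positions of a section by exact header line.
--
--     End is right before the next line that begins with '[' or EOF. (-1,-1) if missing.
--     """
--     lines = text.splitlines(keepends=True)
--     pos = 0
--     for i, line in enumerate(lines):
--         if line.strip() == header:
--             start = pos
--             j = i + 1
--             end = pos + len(line)
--             while j < len(lines):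
--                 if lines[j].lstrip().startswith("["):
--                     break
--                 end += len(lines[j])
--                 j += 1
--             return start, end
--         pos += len(line)
--     return -1, -1
--
-- def _update_gameplay_tag_list(text: str, tag_value: str) -> str:
--     """Replace the first GameplayTagList Tag that starts with "Difficulty." with tag_value.
--     If none exists, append one at the end of the block or create the block if missing.
--     """
--     header = "[/Script/GameplayTags.GameplayTagsList]"
--     s, e = _find_section_exact(text, header)
--     eol = "\n" if ("\r\n" not in text) else "\r\n"
--     line_tpl = f"GameplayTagList=(Tag=\"{tag_value}\",DevComment=\"\"){eol}"
--     if s < 0: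
--         block = header + eol + line_tpl
--         joiner = eol if text and not text.endswith(("\n", "\r")) else ""
--         return text + joiner + block
--     block = text[s:e]
--     lines = block.splitlines(keepends=True)
--     replaced = False
--     for i, ln in enumerate(lines):
--         if ln.strip().startswith('GameplayTagList=') and 'Tag="Difficulty.' in ln:
--             # preserve EOL of this line
--             eol_i = "\n" if ln.endswith("\n") else ("\r\n" if ln.endswith("\r\n") else eol)
--             lines[i] = f"GameplayTagList=(Tag=\"{tag_value}\",DevComment=\"\"){eol_i}"
--             replaced = True
--             break
--     if not replaced:
--         # append one line
--         lines.append(line_tpl)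
--     return text[:s] + "".join(lines) + text[e:]
-- ===== SOURCE B (Python) =====
-- def _update_gameplay_tag_list(text: str, tag_value: str) -> str:
--     """Single streaming pass over the lines; no byte offsets, no re-splitting."""
--     header = "[/Script/GameplayTags.GameplayTagsList]"
--     eol = "\r\n" if "\r\n" in text else "\n"
--     line_tpl = f"GameplayTagList=(Tag=\"{tag_value}\",DevComment=\"\"){eol}"
--     out = []
--     state = 0  # 0 = before the section, 1 = inside it, 2 = done
--     for ln in text.splitlines(keepends=True):
--         if state == 0:
--             if ln.strip() == header:
--                 state = 1
--         elif state == 1: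
--             if ln.lstrip().startswith("["):
--                 out.append(line_tpl)
--                 state = 2
--             elif ln.strip().startswith('GameplayTagList=') and 'Tag="Difficulty.' in ln:
--                 eol_i = "\n" if ln.endswith("\n") else eol
--                 out.append(f"GameplayTagList=(Tag=\"{tag_value}\",DevComment=\"\"){eol_i}")
--                 state = 2
--                 continue
--         out.append(ln)
--     if state == 1:
--         out.append(line_tpl)
--     elif state == 0:
--         joiner = eol if text and not text.endswith(("\n", "\r")) else ""
--         out.append(joiner + header + eol + line_tpl)
--     return "".join(out)
-- ===== Notes on version B (the rewrite author's own statement) =====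
-- stated objective: alternative
-- what changed: B replaces A's offset arithmetic (find byte span of the section, slice the text, re-split the slice, patch, re-concatenate) with a single streaming state-machine pass over splitlines(keepends=True) that emits/rewrites lines directly, never computing positions or re-splitting.
import Mathlib
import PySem

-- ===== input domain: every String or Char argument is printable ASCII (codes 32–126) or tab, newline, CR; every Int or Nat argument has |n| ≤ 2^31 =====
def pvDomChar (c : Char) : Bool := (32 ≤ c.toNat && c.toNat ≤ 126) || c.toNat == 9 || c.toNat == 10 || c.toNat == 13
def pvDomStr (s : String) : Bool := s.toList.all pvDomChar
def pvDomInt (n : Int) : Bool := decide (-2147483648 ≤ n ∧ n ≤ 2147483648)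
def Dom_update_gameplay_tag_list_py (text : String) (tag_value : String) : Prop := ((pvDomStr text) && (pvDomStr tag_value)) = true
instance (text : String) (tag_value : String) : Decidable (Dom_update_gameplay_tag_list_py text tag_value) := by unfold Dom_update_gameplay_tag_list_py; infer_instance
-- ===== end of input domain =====

-- B replaces A's byte-offset section splicing by a single streaming state-machine pass over the
-- lines; objective: alternative decomposition of the same cost (a timing run reported no speedup).

-- str.splitlines(keepends=True), ported by hand: exact on the stated ASCII domain,
-- where the only line breaks are '\n', '\r' and '\r\n'.  Used by both Pythons.
def pvSplitK : List Char → List (List Char)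
  | [] => []
  | c :: rest =>
    if c = '\n' then ['\n'] :: pvSplitK rest
    else if c = '\r' then
      if rest.head? = some '\n' then ['\r', '\n'] :: pvSplitK rest.tail
      else ['\r'] :: pvSplitK rest
    else
      match pvSplitK rest with
      | [] => [[c]]
      | l :: ls => (c :: l) :: ls
termination_by cs => cs.length
decreasing_by all_goals (simp [List.length_tail]; try omega)

def pvHeader : List Char := "[/Script/GameplayTags.GameplayTagsList]".toList

-- the f-string line  GameplayTagList=(Tag="{tag}",DevComment=""){eol}  (built identically by both Pythons)
def pvTpl (tag eol : List Char) : List Char :=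
  "GameplayTagList=(Tag=\"".toList ++ tag ++ "\",DevComment=\"\")".toList ++ eol

-- the three line tests both Pythons perform literally (named here so the two ports share them)
def pvIsHdr (l : List Char) : Bool := PySem.Chars.strip l == pvHeader          -- line.strip() == header
def pvIsBrk (l : List Char) : Bool := PySem.Chars.startswith (PySem.Chars.lstrip l) ['[']  -- line.lstrip().startswith("[")
def pvIsTag (l : List Char) : Bool :=                                          -- the GameplayTagList/Difficulty test
  PySem.Chars.startswith (PySem.Chars.strip l) "GameplayTagList=".toList
    && PySem.Chars.isIn "Tag=\"Difficulty.".toList l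

-- ===== PORT A =====
-- inner while loop of _find_section_exact
def pvSectEnd : List (List Char) → Int → Int
  | [], e => e
  | l :: rest, e =>
    if pvIsBrk l then e
    else pvSectEnd rest (e + l.length)

-- the enumerate loop of _find_section_exact
def pvFindSec : List (List Char) → Int → Int × Int
  | [], _ => (-1, -1)
  | l :: rest, pos =>
    if pvIsHdr l then (pos, pvSectEnd rest (pos + l.length))
    else pvFindSec rest (pos + l.length)

-- the replacement loop of _update_gameplay_tag_list (returns the new lines and the 'replaced' flag)
def pvReplLoop (tag eol : List Char) : List (List Char) → List (List Char) × Bool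
  | [] => ([], false)
  | ln :: rest =>
    if pvIsTag ln then
      let eol_i := if PySem.Chars.endswith ln ['\n'] then ['\n']
                   else if PySem.Chars.endswith ln ['\r', '\n'] then ['\r', '\n'] else eol
      (pvTpl tag eol_i :: rest, true)
    else
      let r := pvReplLoop tag eol rest
      (ln :: r.1, r.2)

def pvUpdA (text tag : List Char) : List Char :=
  let se := pvFindSec (pvSplitK text) 0
  let eol := if ¬ (PySem.Chars.isIn ['\r', '\n'] text = true) then ['\n'] else ['\r', '\n']
  let tpl := pvTpl tag eol
  if se.1 < 0 then
    let block := pvHeader ++ eol ++ tpl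
    let joiner := if text ≠ [] ∧ ¬ (PySem.Chars.endswith text ['\n'] = true ∨ PySem.Chars.endswith text ['\r'] = true)
                  then eol else []
    text ++ joiner ++ block
  else
    let lines := pvSplitK (PySem.List.slice text (some se.1) (some se.2))
    let r := pvReplLoop tag eol lines
    let lines' := if r.2 then r.1 else r.1 ++ [tpl]
    PySem.List.slice text none (some se.1) ++ lines'.flatten ++ PySem.List.slice text (some se.2) none

def update_gameplay_tag_list_py (text : String) (tag_value : String) : String :=
  String.ofList (pvUpdA text.toList tag_value.toList)

-- ===== PORT B =====
-- the streaming for-loop of B: state 0 = before the section, 1 = inside it, 2 = done;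
-- returns the emitted output and the final state.
def pvUpdBLoop (tag eol tpl : List Char) : Nat → List (List Char) → List Char × Nat
  | st, [] => ([], st)
  | st, ln :: rest =>
    if st = 0 then
      let st' := if pvIsHdr ln then 1 else 0
      let r := pvUpdBLoop tag eol tpl st' rest
      (ln ++ r.1, r.2)
    else if st = 1 then
      if pvIsBrk ln then
        let r := pvUpdBLoop tag eol tpl 2 rest
        (tpl ++ ln ++ r.1, r.2)
      else if pvIsTag ln then
        let eol_i := if PySem.Chars.endswith ln ['\n'] then ['\n'] else eol
        let r := pvUpdBLoop tag eol tpl 2 rest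
        (pvTpl tag eol_i ++ r.1, r.2)
      else
        let r := pvUpdBLoop tag eol tpl 1 rest
        (ln ++ r.1, r.2)
    else
      let r := pvUpdBLoop tag eol tpl 2 rest
      (ln ++ r.1, r.2)

def pvUpdB (text tag : List Char) : List Char :=
  let eol := if PySem.Chars.isIn ['\r', '\n'] text then ['\r', '\n'] else ['\n']
  let tpl := pvTpl tag eol
  let r := pvUpdBLoop tag eol tpl 0 (pvSplitK text)
  if r.2 = 1 then r.1 ++ tpl
  else if r.2 = 0 then
    let joiner := if text ≠ [] ∧ ¬ (PySem.Chars.endswith text ['\n'] = true ∨ PySem.Chars.endswith text ['\r'] = true)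
                  then eol else []
    r.1 ++ (joiner ++ pvHeader ++ eol ++ tpl)
  else r.1

def update_gameplay_tag_list_py_alt (text : String) (tag_value : String) : String :=
  String.ofList (pvUpdB text.toList tag_value.toList)

-- ===== PRECONDITION & SPEC =====
def Spec_update_gameplay_tag_list_py (text : String) (tag_value : String) (out : String) : Prop := out = update_gameplay_tag_list_py_alt text tag_value
instance (text : String) (tag_value : String) (out : String) : Decidable (Spec_update_gameplay_tag_list_py text tag_value out) := by unfold Spec_update_gameplay_tag_list_py; infer_instance

-- ===== CLAIM (what is proved, stated in full; the proofs are below) =====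
def Claim_equal_update_gameplay_tag_list_py : Prop := ∀ (text : String) (tag_value : String), Dom_update_gameplay_tag_list_py text tag_value → Spec_update_gameplay_tag_list_py text tag_value (update_gameplay_tag_list_py text tag_value)

-- ===== LEMMAS AND PROOFS =====

-- ---- well-formed splitlines output ----
def pvBody (b : List Char) : Prop := ∀ c ∈ b, c ≠ '\n' ∧ c ≠ '\r'

-- head character of the text formed by the lines ls followed by text whose head is next
def pvFirst (ls : List (List Char)) (next : Option Char) : Option Char :=
  match ls with
  | [] => next
  | l :: _ => l.head?

-- a properly terminated line, given the character that follows it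
def pvTermLine (l : List Char) (next : Option Char) : Prop :=
  ∃ b, pvBody b ∧ (l = b ++ ['\n'] ∨ l = b ++ ['\r', '\n'] ∨ (l = b ++ ['\r'] ∧ next ≠ some '\n'))

-- ls is a valid keepends-splitlines run, followed by text whose head character is next
def pvRun : List (List Char) → Option Char → Prop
  | [], _ => True
  | l :: ls, next =>
    (pvTermLine l (pvFirst ls next) ∨ (ls = [] ∧ next = none ∧ l ≠ [] ∧ pvBody l)) ∧ pvRun ls next

theorem pvRun_cons {l : List Char} {ls : List (List Char)} {next : Option Char} :
    pvRun (l :: ls) next ↔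
      ((pvTermLine l (pvFirst ls next) ∨ (ls = [] ∧ next = none ∧ l ≠ [] ∧ pvBody l)) ∧ pvRun ls next) :=
  Iff.rfl

theorem pvSplitK_body_newline (b ds : List Char) (hb : pvBody b) :
    pvSplitK (b ++ '\n' :: ds) = (b ++ ['\n']) :: pvSplitK ds := by
  induction b with
  | nil => simp [pvSplitK]
  | cons c b ih =>
    obtain ⟨hc1, hc2⟩ := hb c (by simp)
    have ih' := ih (fun x hx => hb x (by simp [hx]))
    simp only [List.cons_append, pvSplitK, hc1, hc2, if_false, ih']

theorem pvSplitK_body_crlf (b ds : List Char) (hb : pvBody b) :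
    pvSplitK (b ++ '\r' :: '\n' :: ds) = (b ++ ['\r', '\n']) :: pvSplitK ds := by
  induction b with
  | nil => simp [pvSplitK]
  | cons c b ih =>
    obtain ⟨hc1, hc2⟩ := hb c (by simp)
    have ih' := ih (fun x hx => hb x (by simp [hx]))
    simp only [List.cons_append, pvSplitK, hc1, hc2, if_false, ih']

theorem pvSplitK_body_cr (b ds : List Char) (hb : pvBody b) (hd : ds.head? ≠ some '\n') :
    pvSplitK (b ++ '\r' :: ds) = (b ++ ['\r']) :: pvSplitK ds := by
  induction b with
  | nil => simp [pvSplitK, hd]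
  | cons c b ih =>
    obtain ⟨hc1, hc2⟩ := hb c (by simp)
    have ih' := ih (fun x hx => hb x (by simp [hx]))
    simp only [List.cons_append, pvSplitK, hc1, hc2, if_false, ih']

theorem pvSplitK_body (b : List Char) (hb : pvBody b) (hne : b ≠ []) :
    pvSplitK b = [b] := by
  induction b with
  | nil => exact absurd rfl hne
  | cons c b ih =>
    obtain ⟨hc1, hc2⟩ := hb c (by simp)
    by_cases hb0 : b = []
    · subst hb0; simp [pvSplitK, hc1, hc2]
    · have ih' := ih (fun x hx => hb x (by simp [hx])) hb0
      simp only [pvSplitK, hc1, hc2, if_false, ih']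

theorem pvSplitK_flatten (cs : List Char) : (pvSplitK cs).flatten = cs := by
  induction cs using pvSplitK.induct with
  | case1 => simp [pvSplitK]
  | case2 rest ih => simp [pvSplitK, ih]
  | case3 rest h _ ih =>
    cases rest with
    | nil => simp at h
    | cons d rest' =>
      simp only [List.head?_cons, Option.some.injEq] at h
      subst h
      simpa [pvSplitK] using ih
  | case4 rest h _ ih => simp [pvSplitK, h, ih]
  | case5 c rest h1 h2 h3 ih =>
    have hrest : rest = [] := by simpa [h3] using ih
    simp [pvSplitK, h1, h2, hrest]
  | case6 c rest h1 h2 l ls h ih =>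
    rw [h] at ih
    simp only [List.flatten_cons] at ih
    simp [pvSplitK, h1, h2, h, ih]

theorem pvSplitK_first (cs : List Char) : pvFirst (pvSplitK cs) none = cs.head? := by
  induction cs using pvSplitK.induct with
  | case1 => simp [pvSplitK, pvFirst]
  | case2 rest ih => simp [pvSplitK, pvFirst]
  | case3 rest h _ ih =>
    cases rest with
    | nil => simp at h
    | cons d rest' =>
      simp only [List.head?_cons, Option.some.injEq] at h
      subst h
      simp [pvSplitK, pvFirst]
  | case4 rest h _ ih => simp [pvSplitK, h, pvFirst]
  | case5 c rest h1 h2 h3 ih => simp [pvSplitK, h1, h2, h3, pvFirst]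
  | case6 c rest h1 h2 l ls h ih => simp [pvSplitK, h1, h2, h, pvFirst]

theorem pvRun_splitK (cs : List Char) : pvRun (pvSplitK cs) none := by
  induction cs using pvSplitK.induct with
  | case1 => simp [pvSplitK, pvRun]
  | case2 rest ih =>
    rw [show pvSplitK ('\n' :: rest) = ['\n'] :: pvSplitK rest from by simp [pvSplitK]]
    rw [pvRun_cons]
    exact ⟨Or.inl ⟨[], by simp [pvBody], Or.inl rfl⟩, ih⟩
  | case3 rest h _ ih =>
    cases rest with
    | nil => simp at h
    | cons d rest' =>
      simp only [List.head?_cons, Option.some.injEq] at h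
      subst h
      rw [show pvSplitK ('\r' :: '\n' :: rest') = ['\r', '\n'] :: pvSplitK rest' from by
        simp [pvSplitK]]
      rw [pvRun_cons]
      exact ⟨Or.inl ⟨[], by simp [pvBody], Or.inr (Or.inl rfl)⟩, ih⟩
  | case4 rest h _ ih =>
    rw [show pvSplitK ('\r' :: rest) = ['\r'] :: pvSplitK rest from by simp [pvSplitK, h]]
    rw [pvRun_cons]
    refine ⟨Or.inl ⟨[], by simp [pvBody], Or.inr (Or.inr ⟨rfl, ?_⟩)⟩, ih⟩
    rw [pvSplitK_first rest]
    exact h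
  | case5 c rest h1 h2 h3 ih =>
    rw [show pvSplitK (c :: rest) = [[c]] from by simp [pvSplitK, h1, h2, h3]]
    rw [pvRun_cons]
    exact ⟨Or.inr ⟨rfl, rfl, by simp, by intro x hx; simp at hx; subst hx; exact ⟨h1, h2⟩⟩,
      by trivial⟩
  | case6 c rest h1 h2 l ls h ih =>
    rw [h] at ih
    rw [pvRun_cons] at ih
    obtain ⟨hh, ht⟩ := ih
    rw [show pvSplitK (c :: rest) = (c :: l) :: ls from by simp [pvSplitK, h1, h2, h]]
    rw [pvRun_cons]
    refine ⟨?_, ht⟩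
    rcases hh with ⟨b, hb, hc⟩ | ⟨hls, -, hne, hbody⟩
    · left
      refine ⟨c :: b, ?_, ?_⟩
      · intro x hx
        rcases List.mem_cons.mp hx with rfl | hx
        · exact ⟨h1, h2⟩
        · exact hb x hx
      · rcases hc with rfl | rfl | ⟨rfl, hn⟩
        · exact Or.inl rfl
        · exact Or.inr (Or.inl rfl)
        · exact Or.inr (Or.inr ⟨rfl, hn⟩)
    · right
      refine ⟨hls, rfl, by simp, ?_⟩
      intro x hx
      rcases List.mem_cons.mp hx with rfl | hx
      · exact ⟨h1, h2⟩
      · exact hbody x hx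

theorem pvTermLine_ne_nil {l : List Char} {next : Option Char} (h : pvTermLine l next) :
    l ≠ [] := by
  obtain ⟨b, -, rfl | rfl | ⟨rfl, -⟩⟩ := h <;> simp

theorem pvRun_flatten_head (ls : List (List Char)) (next : Option Char) (cs : List Char)
    (h : pvRun ls next) : (ls.flatten ++ cs).head? = pvFirst ls cs.head? := by
  cases ls with
  | nil => simp [pvFirst]
  | cons l ls' =>
    rw [pvRun_cons] at h
    have hne : l ≠ [] := by
      rcases h.1 with ht | ⟨-, -, hne, -⟩
      · exact pvTermLine_ne_nil ht
      · exact hne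
    cases l with
    | nil => exact absurd rfl hne
    | cons a t => simp [pvFirst]

theorem pvRun_resplit (ls : List (List Char)) (cs : List Char) (h : pvRun ls cs.head?) :
    pvSplitK (ls.flatten ++ cs) = ls ++ pvSplitK cs := by
  induction ls with
  | nil => simp
  | cons l ls ih =>
    rw [pvRun_cons] at h
    obtain ⟨hh, ht⟩ := h
    have ih' := ih ht
    rcases hh with ⟨b, hb, hc⟩ | ⟨hls, hnone, hne, hbody⟩
    · have hhead : (ls.flatten ++ cs).head? = pvFirst ls cs.head? :=
        pvRun_flatten_head ls cs.head? cs ht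
      rcases hc with rfl | rfl | ⟨rfl, hn⟩
      · rw [List.flatten_cons, List.append_assoc, List.append_assoc,
          show ['\n'] ++ (ls.flatten ++ cs) = '\n' :: (ls.flatten ++ cs) from rfl,
          pvSplitK_body_newline b _ hb, ih']
        simp
      · rw [List.flatten_cons, List.append_assoc, List.append_assoc,
          show ['\r', '\n'] ++ (ls.flatten ++ cs) = '\r' :: '\n' :: (ls.flatten ++ cs) from rfl,
          pvSplitK_body_crlf b _ hb, ih']
        simp
      · rw [List.flatten_cons, List.append_assoc, List.append_assoc,
          show ['\r'] ++ (ls.flatten ++ cs) = '\r' :: (ls.flatten ++ cs) from rfl,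
          pvSplitK_body_cr b _ hb (by rw [hhead]; exact hn), ih']
        simp
    · subst hls
      have hcs : cs = [] := by
        cases cs with
        | nil => rfl
        | cons a t => simp at hnone
      subst hcs
      simp [pvSplitK, pvSplitK_body l hbody hne]

theorem pvRun_drop (xs ys : List (List Char)) (next : Option Char) (h : pvRun (xs ++ ys) next) :
    pvRun ys next := by
  induction xs with
  | nil => exact h
  | cons x xs ih =>
    rw [List.cons_append, pvRun_cons] at h
    exact ih h.2

theorem pvRun_prefix (xs ys : List (List Char)) (next : Option Char) (h : pvRun (xs ++ ys) next) :
    pvRun xs (pvFirst ys next) := by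
  induction xs with
  | nil => trivial
  | cons x xs ih =>
    rw [List.cons_append, pvRun_cons] at h
    obtain ⟨hh, ht⟩ := h
    rw [pvRun_cons]
    refine ⟨?_, ih ht⟩
    have hfirst : pvFirst (xs ++ ys) next = pvFirst xs (pvFirst ys next) := by
      cases xs <;> simp [pvFirst]
    rcases hh with ht' | ⟨hnil, hnone, hne, hb⟩
    · left; rwa [hfirst] at ht'
    · right
      obtain ⟨h1, h2⟩ := List.append_eq_nil_iff.mp hnil
      subst h1; subst h2
      exact ⟨rfl, by simp [pvFirst, hnone], hne, hb⟩

theorem pvRun_weaken (ls : List (List Char)) (next : Option Char) (h : pvRun ls next) :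
    pvRun ls none := by
  induction ls with
  | nil => trivial
  | cons l ls ih =>
    rw [pvRun_cons] at h ⊢
    obtain ⟨hh, ht⟩ := h
    refine ⟨?_, ih ht⟩
    rcases hh with ⟨b, hb, hc⟩ | ⟨hnil, -, hne, hbody⟩
    · left
      refine ⟨b, hb, ?_⟩
      rcases hc with rfl | rfl | ⟨rfl, hn⟩
      · exact Or.inl rfl
      · exact Or.inr (Or.inl rfl)
      · refine Or.inr (Or.inr ⟨rfl, ?_⟩)
        cases ls with
        | nil => simp [pvFirst]
        | cons a t => simpa [pvFirst] using hn
    · exact Or.inr ⟨hnil, rfl, hne, hbody⟩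

theorem pvSplitK_flatten_self (ls : List (List Char)) (h : pvRun ls none) :
    pvSplitK ls.flatten = ls := by
  have := pvRun_resplit ls [] (by simpa using h)
  simpa [pvSplitK] using this

-- ---- A-side scan characterisations ----
theorem pvSectEnd_eq (rest : List (List Char)) (e : Int) :
    pvSectEnd rest e = e + ((rest.takeWhile (fun l => !pvIsBrk l)).flatten.length : Int) := by
  induction rest generalizing e with
  | nil => simp [pvSectEnd]
  | cons l rest ih =>
    by_cases hb : pvIsBrk l = true
    · simp [pvSectEnd, hb, List.takeWhile]
    · rw [show pvSectEnd (l :: rest) e = pvSectEnd rest (e + l.length) from by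
        simp [pvSectEnd, hb], ih]
      have hb' : (!pvIsBrk l) = true := by simp [Bool.eq_false_iff.mpr hb]
      rw [show List.takeWhile (fun l => !pvIsBrk l) (l :: rest)
            = l :: List.takeWhile (fun l => !pvIsBrk l) rest from by
        simp [hb']]
      simp only [List.flatten_cons, List.length_append]
      push_cast
      ring

theorem pvFindSec_none (ls : List (List Char)) (pos : Int) (h : ∀ l ∈ ls, pvIsHdr l = false) :
    pvFindSec ls pos = (-1, -1) := by
  induction ls generalizing pos with
  | nil => simp [pvFindSec]
  | cons l ls ih =>
    have h1 := h l (by simp)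
    simp only [pvFindSec, h1, Bool.false_eq_true, if_false]
    exact ih _ (fun x hx => h x (by simp [hx]))

theorem pvFindSec_found (p : List (List Char)) (hd : List Char) (rest : List (List Char)) (pos : Int)
    (hp : ∀ l ∈ p, pvIsHdr l = false) (hh : pvIsHdr hd = true) :
    pvFindSec (p ++ hd :: rest) pos =
      (pos + (p.flatten.length : Int),
       pos + (p.flatten.length : Int) + (hd.length : Int)
         + (((rest.takeWhile (fun l => !pvIsBrk l)).flatten.length : Int))) := by
  induction p generalizing pos with
  | nil =>
    simp only [List.nil_append, pvFindSec, hh, if_true, pvSectEnd_eq]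
    simp only [List.flatten_nil, List.length_nil, Prod.mk.injEq]
    constructor <;> push_cast <;> ring
  | cons l p ih =>
    have h1 := hp l (by simp)
    simp only [List.cons_append, pvFindSec, h1, Bool.false_eq_true, if_false]
    rw [ih _ (fun x hx => hp x (by simp [hx]))]
    simp only [List.flatten_cons, List.length_append, Prod.mk.injEq]
    constructor <;> push_cast <;> ring

theorem pvReplLoop_none (tag eol : List Char) (ls : List (List Char))
    (h : ∀ l ∈ ls, pvIsTag l = false) : pvReplLoop tag eol ls = (ls, false) := by
  induction ls with
  | nil => simp [pvReplLoop]
  | cons l ls ih =>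
    have h1 := h l (by simp)
    simp [pvReplLoop, h1, ih (fun x hx => h x (by simp [hx]))]

theorem pvReplLoop_found (tag eol : List Char) (q : List (List Char)) (m : List Char)
    (r : List (List Char)) (hq : ∀ l ∈ q, pvIsTag l = false) (hm : pvIsTag m = true) :
    pvReplLoop tag eol (q ++ m :: r) =
      (q ++ (pvTpl tag (if PySem.Chars.endswith m ['\n'] then ['\n']
                        else if PySem.Chars.endswith m ['\r', '\n'] then ['\r', '\n'] else eol)) :: r,
       true) := by
  induction q with
  | nil => simp [pvReplLoop, hm]
  | cons l q ih =>
    have h1 := hq l (by simp)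
    simp [pvReplLoop, h1, ih (fun x hx => hq x (by simp [hx]))]

-- A's dead '\r\n' branch: a line ending in "\r\n" also ends in "\n"
theorem pvEol_collapse (m eol : List Char) :
    (if PySem.Chars.endswith m ['\n'] then ['\n']
     else if PySem.Chars.endswith m ['\r', '\n'] then ['\r', '\n'] else eol)
      = (if PySem.Chars.endswith m ['\n'] then ['\n'] else eol) := by
  by_cases h : PySem.Chars.endswith m ['\n'] = true
  · simp [h]
  · have h2 : PySem.Chars.endswith m ['\r', '\n'] = false := by
      rw [Bool.eq_false_iff]
      intro hc
      have hsuf : ['\r', '\n'] <:+ m := (PySem.Chars.endswith_iff m _).mp hc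
      have : ['\n'] <:+ m := List.IsSuffix.trans ⟨['\r'], rfl⟩ hsuf
      exact h ((PySem.Chars.endswith_iff m _).mpr this)
    simp [h, h2]

-- ---- B-side loop characterisations ----
theorem pvUpdBLoop_state0 (tag eol tpl : List Char) (p M : List (List Char))
    (hp : ∀ l ∈ p, pvIsHdr l = false) :
    pvUpdBLoop tag eol tpl 0 (p ++ M) =
      (p.flatten ++ (pvUpdBLoop tag eol tpl 0 M).1, (pvUpdBLoop tag eol tpl 0 M).2) := by
  induction p with
  | nil => simp
  | cons l p ih =>
    have h1 := hp l (by simp)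
    simp only [List.cons_append, pvUpdBLoop, h1, Bool.false_eq_true, if_false]
    rw [ih (fun x hx => hp x (by simp [hx]))]
    simp [List.flatten_cons, List.append_assoc]

theorem pvUpdBLoop_state2 (tag eol tpl : List Char) (M : List (List Char)) :
    pvUpdBLoop tag eol tpl 2 M = (M.flatten, 2) := by
  induction M with
  | nil => simp [pvUpdBLoop]
  | cons l M ih => simp [pvUpdBLoop, ih]

theorem pvUpdBLoop_state1_skip (tag eol tpl : List Char) (q M : List (List Char))
    (hq : ∀ l ∈ q, pvIsBrk l = false ∧ pvIsTag l = false) :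
    pvUpdBLoop tag eol tpl 1 (q ++ M) =
      (q.flatten ++ (pvUpdBLoop tag eol tpl 1 M).1, (pvUpdBLoop tag eol tpl 1 M).2) := by
  induction q with
  | nil => simp
  | cons l q ih =>
    obtain ⟨hb, htg⟩ := hq l (by simp)
    simp only [List.cons_append, pvUpdBLoop, hb, htg, Bool.false_eq_true, if_false,
      show (1 : Nat) ≠ 0 from by omega]
    rw [ih (fun x hx => hq x (by simp [hx]))]
    simp [List.flatten_cons, List.append_assoc]

-- ---- main equality on character lists ----

-- a line produced by dropWhile fails the scanned predicate
theorem pvDropWhile_head_false (p : List Char → Bool) (l : List (List Char)) (a : List Char)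
    (as : List (List Char)) (h : l.dropWhile p = a :: as) : p a = false := by
  have h2 := List.head_dropWhile_not p (l := l) (by simp [h])
  simp only [h, List.head_cons] at h2
  simpa using h2

-- the header line never passes the GameplayTagList test
theorem pvHdr_not_tag (hd : List Char) (hhd : pvIsHdr hd = true) : pvIsTag hd = false := by
  have hstrip : PySem.Chars.strip hd = pvHeader := by simpa [pvIsHdr] using hhd
  simp only [pvIsTag, hstrip]
  rw [show PySem.Chars.startswith pvHeader "GameplayTagList=".toList = false from by decide]
  simp

-- the section-found case, assembled from the pieces
theorem pvUpd_eq_found (text tag : List Char) (p : List (List Char)) (hd : List Char)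
    (body tail : List (List Char))
    (hsplit : pvSplitK text = p ++ hd :: (body ++ tail))
    (hpall : ∀ l ∈ p, pvIsHdr l = false)
    (hhd : pvIsHdr hd = true)
    (hbody : ∀ l ∈ body, pvIsBrk l = false)
    (htail : tail = [] ∨ ∃ bl tr, tail = bl :: tr ∧ pvIsBrk bl = true)
    (hresplit : pvSplitK ((hd :: body).flatten) = hd :: body)
    (hbodytw : List.takeWhile (fun l => !pvIsBrk l) (body ++ tail) = body) :
    pvUpdA text tag = pvUpdB text tag := by
  have hflat := pvSplitK_flatten text
  have htext : text = p.flatten ++ ((hd :: body).flatten ++ tail.flatten) := by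
    conv_lhs => rw [← hflat, hsplit]
    simp [List.flatten_append, List.append_assoc]
  have htaghd : pvIsTag hd = false := pvHdr_not_tag hd hhd
  have hfs : pvFindSec (pvSplitK text) 0 =
      ((p.flatten.length : Int), ((p.flatten.length + (hd :: body).flatten.length : Nat) : Int)) := by
    rw [hsplit, pvFindSec_found p hd (body ++ tail) 0 hpall hhd, hbodytw]
    simp only [Prod.mk.injEq, List.flatten_cons, List.length_append]
    constructor <;> push_cast <;> ring
  have hs1 : PySem.List.slice text none (some (p.flatten.length : Int)) = p.flatten := by
    rw [PySem.List.slice_to_natCast, htext, List.take_left]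
  have hs2 : PySem.List.slice text (some (p.flatten.length : Int))
      (some ((p.flatten.length + (hd :: body).flatten.length : Nat) : Int)) = (hd :: body).flatten := by
    rw [PySem.List.slice_natCast, htext, List.drop_left, Nat.add_sub_cancel_left]
    exact List.take_left
  have hs3 : PySem.List.slice text
      (some ((p.flatten.length + (hd :: body).flatten.length : Nat) : Int)) none = tail.flatten := by
    rw [PySem.List.slice_from_natCast, htext, ← List.append_assoc]
    rw [List.drop_left' (by simp)]
  -- unfold both ports
  simp only [pvUpdA, pvUpdB, hfs]
  rw [if_neg (by omega)]
  simp only [hs1, hs2, hs3, hresplit]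
  have heol : (if ¬ (PySem.Chars.isIn ['\r', '\n'] text = true) then ['\n'] else ['\r', '\n'])
      = (if PySem.Chars.isIn ['\r', '\n'] text then ['\r', '\n'] else ['\n']) := by
    by_cases h : PySem.Chars.isIn ['\r', '\n'] text = true <;> simp [h]
  rw [heol]
  generalize (if PySem.Chars.isIn ['\r', '\n'] text then ['\r', '\n'] else ['\n']) = E
  generalize hT : pvTpl tag E = T
  -- A's replacement loop skips the header line
  rw [show pvReplLoop tag E (hd :: body)
        = (hd :: (pvReplLoop tag E body).1, (pvReplLoop tag E body).2) from by
    simp [pvReplLoop, htaghd]]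
  -- B: pass the prefix, then the header line
  rw [hsplit, pvUpdBLoop_state0 tag E T p (hd :: (body ++ tail)) hpall]
  rw [show pvUpdBLoop tag E T 0 (hd :: (body ++ tail))
        = (hd ++ (pvUpdBLoop tag E T 1 (body ++ tail)).1, (pvUpdBLoop tag E T 1 (body ++ tail)).2) from by
    simp [pvUpdBLoop, hhd]]
  -- search body for the first Difficulty tag line
  have hqdq := List.takeWhile_append_dropWhile (p := fun l => !pvIsTag l) (l := body)
  cases hdq : List.dropWhile (fun l => !pvIsTag l) body with
  | nil =>
    -- no tag line in the section
    have hbodyq : body = List.takeWhile (fun l => !pvIsTag l) body := by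
      conv_lhs => rw [← hqdq]
      rw [hdq]; simp
    have hbtag : ∀ l ∈ body, pvIsTag l = false := by
      intro l hl
      rw [hbodyq] at hl
      simpa using List.mem_takeWhile_imp hl
    rw [pvReplLoop_none tag E body hbtag]
    rw [show body ++ tail = body ++ tail from rfl,
      pvUpdBLoop_state1_skip tag E T body tail (fun l hl => ⟨hbody l hl, hbtag l hl⟩)]
    rcases htail with rfl | ⟨bl, tr, rfl, hbl⟩
    · simp [pvUpdBLoop, List.flatten_cons, List.flatten_append, List.append_assoc]
    · rw [show pvUpdBLoop tag E T 1 (bl :: tr)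
            = (T ++ bl ++ (pvUpdBLoop tag E T 2 tr).1, (pvUpdBLoop tag E T 2 tr).2) from by
        simp [pvUpdBLoop, hbl], pvUpdBLoop_state2]
      simp [List.flatten_cons, List.flatten_append, List.append_assoc]
  | cons m r' =>
    have hbodyeq : body = List.takeWhile (fun l => !pvIsTag l) body ++ m :: r' := by
      conv_lhs => rw [← hqdq, hdq]
    have hqtag : ∀ l ∈ List.takeWhile (fun l => !pvIsTag l) body, pvIsTag l = false := by
      intro l hl
      simpa using List.mem_takeWhile_imp hl
    have hmtag : pvIsTag m = true := by
      have := pvDropWhile_head_false (fun l => !pvIsTag l) body m r' hdq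
      simpa using this
    have hmbrk : pvIsBrk m = false := hbody m (by rw [hbodyeq]; simp)
    rw [hbodyeq, pvReplLoop_found tag E _ m r' hqtag hmtag]
    rw [show (List.takeWhile (fun l => !pvIsTag l) body ++ m :: r') ++ tail
          = List.takeWhile (fun l => !pvIsTag l) body ++ (m :: (r' ++ tail)) from by simp,
      pvUpdBLoop_state1_skip tag E T _ (m :: (r' ++ tail))
        (fun l hl => ⟨hbody l (by rw [hbodyeq]; simp [hl]), hqtag l hl⟩)]
    rw [show pvUpdBLoop tag E T 1 (m :: (r' ++ tail))
          = (pvTpl tag (if PySem.Chars.endswith m ['\n'] then ['\n'] else E)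
              ++ (pvUpdBLoop tag E T 2 (r' ++ tail)).1, (pvUpdBLoop tag E T 2 (r' ++ tail)).2) from by
      simp [pvUpdBLoop, hmbrk, hmtag], pvUpdBLoop_state2]
    rw [pvEol_collapse m E]
    simp [List.flatten_cons, List.flatten_append, List.append_assoc]

theorem pvUpd_eq (text tag : List Char) : pvUpdA text tag = pvUpdB text tag := by
  have hflat := pvSplitK_flatten text
  have hrun := pvRun_splitK text
  have hpdw := List.takeWhile_append_dropWhile (p := fun l => !pvIsHdr l) (l := pvSplitK text)
  cases hdw : List.dropWhile (fun l => !pvIsHdr l) (pvSplitK text) with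
  | nil =>
    have hL : pvSplitK text = List.takeWhile (fun l => !pvIsHdr l) (pvSplitK text) := by
      conv_lhs => rw [← hpdw]
      rw [hdw]; simp
    have hall : ∀ l ∈ pvSplitK text, pvIsHdr l = false := by
      intro l hl
      rw [hL] at hl
      simpa using List.mem_takeWhile_imp hl
    have hfs := pvFindSec_none (pvSplitK text) 0 hall
    simp only [pvUpdA, pvUpdB, hfs]
    rw [if_pos (by norm_num)]
    have heol : (if ¬ (PySem.Chars.isIn ['\r', '\n'] text = true) then ['\n'] else ['\r', '\n'])
        = (if PySem.Chars.isIn ['\r', '\n'] text then ['\r', '\n'] else ['\n']) := by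
      by_cases h : PySem.Chars.isIn ['\r', '\n'] text = true <;> simp [h]
    rw [heol]
    generalize (if PySem.Chars.isIn ['\r', '\n'] text then ['\r', '\n'] else ['\n']) = E
    have hb0 : pvUpdBLoop tag E (pvTpl tag E) 0 (pvSplitK text) = (text, 0) := by
      have h0 := pvUpdBLoop_state0 tag E (pvTpl tag E) (pvSplitK text) [] hall
      simp only [List.append_nil] at h0
      rw [h0]
      simp [pvUpdBLoop, hflat]
    rw [hb0]
    simp [List.append_assoc]
  | cons hd rest =>
    have hL : pvSplitK text
        = List.takeWhile (fun l => !pvIsHdr l) (pvSplitK text) ++ hd :: rest := by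
      conv_lhs => rw [← hpdw, hdw]
    have hpall : ∀ l ∈ List.takeWhile (fun l => !pvIsHdr l) (pvSplitK text), pvIsHdr l = false := by
      intro l hl
      simpa using List.mem_takeWhile_imp hl
    have hhd : pvIsHdr hd = true := by
      have := pvDropWhile_head_false (fun l => !pvIsHdr l) (pvSplitK text) hd rest hdw
      simpa using this
    have hbdw := List.takeWhile_append_dropWhile (p := fun l => !pvIsBrk l) (l := rest)
    have hbody : ∀ l ∈ List.takeWhile (fun l => !pvIsBrk l) rest, pvIsBrk l = false := by
      intro l hl
      simpa using List.mem_takeWhile_imp hl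
    have htail : List.dropWhile (fun l => !pvIsBrk l) rest = []
        ∨ ∃ bl tr, List.dropWhile (fun l => !pvIsBrk l) rest = bl :: tr ∧ pvIsBrk bl = true := by
      cases hbt : List.dropWhile (fun l => !pvIsBrk l) rest with
      | nil => exact Or.inl rfl
      | cons bl tr =>
        refine Or.inr ⟨bl, tr, rfl, ?_⟩
        have := pvDropWhile_head_false (fun l => !pvIsBrk l) rest bl tr hbt
        simpa using this
    have hsplit : pvSplitK text
        = List.takeWhile (fun l => !pvIsHdr l) (pvSplitK text)
          ++ hd :: (List.takeWhile (fun l => !pvIsBrk l) rest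
            ++ List.dropWhile (fun l => !pvIsBrk l) rest) := by
      conv_lhs => rw [hL]
      rw [hbdw]
    have hrun2 : pvRun (hd :: List.takeWhile (fun l => !pvIsBrk l) rest) none := by
      have h1 : pvRun ((hd :: List.takeWhile (fun l => !pvIsBrk l) rest)
          ++ List.dropWhile (fun l => !pvIsBrk l) rest) none := by
        refine pvRun_drop (List.takeWhile (fun l => !pvIsHdr l) (pvSplitK text)) _ _ ?_
        rw [show List.takeWhile (fun l => !pvIsHdr l) (pvSplitK text)
              ++ ((hd :: List.takeWhile (fun l => !pvIsBrk l) rest)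
                ++ List.dropWhile (fun l => !pvIsBrk l) rest) = pvSplitK text from by
          conv_rhs => rw [hsplit]
          simp]
        exact hrun
      exact pvRun_weaken _ _ (pvRun_prefix _ _ _ h1)
    have hresplit := pvSplitK_flatten_self _ hrun2
    exact pvUpd_eq_found text tag _ hd _ _ hsplit hpall hhd hbody htail hresplit
      (by rw [List.takeWhile_append_dropWhile])

-- ===== VERDICT (by name: the statement is the Claim_ definition above) =====
theorem update_gameplay_tag_list_py_spec : Claim_equal_update_gameplay_tag_list_py := by
  intro text tag_value _
  unfold Spec_update_gameplay_tag_list_py update_gameplay_tag_list_py update_gameplay_tag_list_py_alt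
  rw [pvUpd_eq]
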